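-- pv_equiv track=rewrite | github.com/tlgs/aoc-2023 | 02.py | part_one
-- ===== SOURCE A (Python) =====
-- def part_one(games):
--     total = 0
--     for i, game in enumerate(games, start=1):
--         for r, g, b in game:
--             if r > 12 or g > 13 or b > 14:
--                 break
--         else:
--             total += i
--
--     return total
-- ===== SOURCE B (Python) =====
-- def part_one(games):
--     return sum(
--         i
--         for i, game in enumerate(games, start=1)
--         if max((r for r, _, _ in game), default=0) <= 12
--         and max((g for _, g, _ in game), default=0) <= 13
--         and max((b for _, _, b in game), default=0) <= 14
--     )
-- ===== Notes on version B (the rewrite author's own statement) =====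
-- stated objective: simpler
-- what changed: Replaces the early-break per-round scan with an aggregate-first structure: compute the three per-colour maxima of each game (default 0) and sum the indices whose maxima fit the limits, as one sum-of-comprehension.
import Mathlib
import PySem

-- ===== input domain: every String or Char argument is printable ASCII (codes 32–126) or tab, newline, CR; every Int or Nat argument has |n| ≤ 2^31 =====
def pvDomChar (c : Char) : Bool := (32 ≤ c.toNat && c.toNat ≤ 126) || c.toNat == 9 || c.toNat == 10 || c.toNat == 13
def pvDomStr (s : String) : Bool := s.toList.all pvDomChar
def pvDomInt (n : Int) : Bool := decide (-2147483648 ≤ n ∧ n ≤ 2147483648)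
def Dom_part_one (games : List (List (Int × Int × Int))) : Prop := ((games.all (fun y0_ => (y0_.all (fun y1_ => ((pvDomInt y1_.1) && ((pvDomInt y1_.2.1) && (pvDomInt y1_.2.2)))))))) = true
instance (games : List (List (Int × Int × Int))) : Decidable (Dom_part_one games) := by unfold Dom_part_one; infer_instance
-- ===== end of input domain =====

-- B replaces A's early-break per-round scan with per-colour maxima (default 0) and one
-- threshold comparison per game, summed over a comprehension (objective: simpler).

-- ===== PORT A =====
-- inner 'for r, g, b in game: … break / else': true iff the else-branch fires
def part_one_ok : List (Int × Int × Int) → Bool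
  | [] => true
  | (r, g, b) :: rest => if r > 12 || g > 13 || b > 14 then false else part_one_ok rest

def part_one (games : List (List (Int × Int × Int))) : Int :=
  (PySem.List.enumerate games 1).foldl
    (fun total p => if part_one_ok p.2 then total + p.1 else total) 0

-- ===== PORT B =====
-- max(gen, default=0)
def part_one_maxD (xs : List Int) : Int := (PySem.List.max? xs (fun x => x)).getD 0

def part_one_alt (games : List (List (Int × Int × Int))) : Int :=
  (((PySem.List.enumerate games 1).filter
      (fun p => part_one_maxD (p.2.map (·.1)) ≤ 12
             && part_one_maxD (p.2.map (·.2.1)) ≤ 13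
             && part_one_maxD (p.2.map (·.2.2)) ≤ 14)).map (·.1)).sum

-- ===== PRECONDITION & SPEC =====
def Spec_part_one (games : List (List (Int × Int × Int))) (out : Int) : Prop := out = part_one_alt games
instance (games : List (List (Int × Int × Int))) (out : Int) : Decidable (Spec_part_one games out) := by unfold Spec_part_one; infer_instance

-- ===== CLAIM (what is proved, stated in full; the proofs are below) =====
def Claim_equal_part_one : Prop := ∀ (games : List (List (Int × Int × Int))), Dom_part_one games → Spec_part_one games (part_one games)

-- ===== LEMMAS AND PROOFS =====

lemma part_one_maxD_le (xs : List Int) (c : Int) (hc : 0 ≤ c) :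
    (part_one_maxD xs ≤ c) ↔ ∀ y ∈ xs, y ≤ c := by
  unfold part_one_maxD
  cases hm : PySem.List.max? xs (fun x => x) with
  | none =>
      simp [(PySem.List.max?_eq_none_iff xs _).mp hm, hc]
  | some m =>
      have hmem := PySem.List.max?_mem hm
      have hmax := PySem.List.max?_isMax hm
      simp only [Option.getD_some]
      exact ⟨fun h y hy => le_trans (hmax y hy) h, fun h => h m hmem⟩

lemma part_one_ok_iff (game : List (Int × Int × Int)) :
    part_one_ok game = true ↔ ∀ t ∈ game, t.1 ≤ 12 ∧ t.2.1 ≤ 13 ∧ t.2.2 ≤ 14 := by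
  induction game with
  | nil => simp [part_one_ok]
  | cons hd tl ih =>
      obtain ⟨r, g, b⟩ := hd
      simp only [part_one_ok]
      by_cases h : (r > 12 || g > 13 || b > 14) = true
      · rw [if_pos h]
        simp only [Bool.or_eq_true, decide_eq_true_eq] at h
        constructor
        · intro hf; cases hf
        · intro hall
          have h0 := hall (r, g, b) (List.mem_cons_self ..)
          dsimp only at h0
          omega
      · rw [if_neg h, ih]
        simp only [Bool.or_eq_true, decide_eq_true_eq, not_or, not_lt] at h
        constructor
        · intro hall t ht
          rcases List.mem_cons.mp ht with rfl | ht'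
          · exact ⟨h.1.1, h.1.2, h.2⟩
          · exact hall t ht'
        · intro hall t ht; exact hall t (List.mem_cons_of_mem _ ht)

lemma part_one_cond_eq (game : List (Int × Int × Int)) :
    part_one_ok game =
      (part_one_maxD (game.map (·.1)) ≤ 12
        && part_one_maxD (game.map (·.2.1)) ≤ 13
        && part_one_maxD (game.map (·.2.2)) ≤ 14) := by
  rw [Bool.eq_iff_iff, part_one_ok_iff]
  simp only [Bool.and_eq_true, decide_eq_true_eq,
    part_one_maxD_le _ 12 (by norm_num), part_one_maxD_le _ 13 (by norm_num),
    part_one_maxD_le _ 14 (by norm_num)]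
  constructor
  · intro h
    refine ⟨⟨?_, ?_⟩, ?_⟩ <;>
      · intro y hy
        obtain ⟨t, ht, rfl⟩ := List.mem_map.mp hy
        first
          | exact (h t ht).1
          | exact (h t ht).2.1
          | exact (h t ht).2.2
  · rintro ⟨⟨h1, h2⟩, h3⟩ t ht
    exact ⟨h1 _ (List.mem_map.mpr ⟨t, ht, rfl⟩),
           h2 _ (List.mem_map.mpr ⟨t, ht, rfl⟩),
           h3 _ (List.mem_map.mpr ⟨t, ht, rfl⟩)⟩

lemma part_one_foldl_sum (l : List (Int × List (Int × Int × Int)))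
    (c : Int × List (Int × Int × Int) → Bool) (acc : Int) :
    l.foldl (fun total p => if c p then total + p.1 else total) acc
      = acc + ((l.filter c).map (·.1)).sum := by
  induction l generalizing acc with
  | nil => simp
  | cons hd tl ih =>
      by_cases h : c hd <;> simp [List.foldl_cons, h, ih]; ring

theorem part_one_spec : Claim_equal_part_one := by
  intro games _
  unfold Spec_part_one part_one part_one_alt
  rw [part_one_foldl_sum]
  simp only [zero_add]
  rw [List.filter_congr (fun p _ => part_one_cond_eq p.2)]
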